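-- pv_equiv track=rewrite | github.com/OZestina/TheGreatestGrace | codingTest/programmers/py/221013_삼총사.py | find3
-- ===== SOURCE A (Python) =====
-- def find3(number, sumn, start, remain):
--     count = 0
--     if remain == 1:
--         for i in range(start, len(number) - remain + 1):
--             if sumn + number[i] == 0:
--                 count += 1
--         return count
--     else:
--         for i in range(start, len(number) - remain + 1):
--             count += find3(number, sumn + number[i], i+1, remain - 1)
--         return count
-- ===== SOURCE B (Python) =====
-- def find3(number, sumn, start, remain):
--     # Count remain-element combinations (by index, increasing) from number[start:]
--     # whose sum is -sumn.  Fix leading elements recursively; count the last PAIR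
--     # in one pass with a hash map of seen values instead of a nested loop.
--     def count_eq(lst, target):
--         return sum(1 for x in lst if x == target)
--
--     def count_pairs(lst, target):
--         seen = {}
--         cnt = 0
--         for x in lst:
--             cnt += seen.get(target - x, 0)
--             seen[x] = seen.get(x, 0) + 1
--         return cnt
--
--     def go(lst, target, k):
--         if k < 1 or k > len(lst):
--             return 0
--         if k == 1:
--             return count_eq(lst, target)
--         if k == 2:
--             return count_pairs(lst, target)
--         total = 0
--         for idx in range(len(lst) - k + 1):
--             total += go(lst[idx + 1:], target - lst[idx], k - 1)
--         return total
--
--     return go(number[start:], -sumn, remain)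
-- ===== Notes on version B (the rewrite author's own statement) =====
-- stated objective: alternative
-- what changed: B counts the final pair level in a single pass with a hash map of previously seen values (and recurses on explicit suffix slices for the higher levels) instead of A's fully nested index loops, removing one nested scan per leading choice.
-- outside the precondition, e.g. on find3([2, -1, -1], 1, -2, 1): A returns 4, B returns 2
import Mathlib
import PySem

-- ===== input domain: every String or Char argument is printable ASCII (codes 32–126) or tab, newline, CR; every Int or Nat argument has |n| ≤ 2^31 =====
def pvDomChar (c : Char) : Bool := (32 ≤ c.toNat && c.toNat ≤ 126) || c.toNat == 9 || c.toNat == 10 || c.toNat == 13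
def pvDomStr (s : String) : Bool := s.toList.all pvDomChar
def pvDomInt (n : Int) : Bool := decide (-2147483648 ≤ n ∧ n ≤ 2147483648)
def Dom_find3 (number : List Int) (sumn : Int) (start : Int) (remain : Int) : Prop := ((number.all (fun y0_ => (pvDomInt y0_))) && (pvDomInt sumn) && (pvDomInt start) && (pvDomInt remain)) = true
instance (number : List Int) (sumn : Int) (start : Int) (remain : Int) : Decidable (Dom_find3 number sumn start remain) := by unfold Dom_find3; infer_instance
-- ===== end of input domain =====

-- ===== PORT A =====
-- B fixes the leading elements recursively but counts the final pair level in one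
-- hashed pass over the suffix instead of A's two innermost nested index loops (objective: alternative).
-- A's recursion depth is remain; fuel remain.toNat makes the Lean recursion structural
-- (for remain ≤ 0, outside Pre_, Python A raises IndexError or returns 0).
def find3Aux (number : List Int) (sumn : Int) (start : Int) : Nat → Int
  | 0 => 0
  | 1 =>
      (PySem.List.pyRange start ((number.length : Int) - 1 + 1) 1).foldl
        (fun count i => if sumn + PySem.List.pyGetD number i 0 == 0 then count + 1 else count) 0
  | (r + 2) =>
      (PySem.List.pyRange start ((number.length : Int) - ((r : Int) + 2) + 1) 1).foldl
        (fun count i =>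
          count + find3Aux number (sumn + PySem.List.pyGetD number i 0) (i + 1) (r + 1)) 0

def find3 (number : List Int) (sumn : Int) (start : Int) (remain : Int) : Int :=
  find3Aux number sumn start remain.toNat

-- ===== PORT B =====
def countEqB (lst : List Int) (target : Int) : Int :=
  lst.foldl (fun c x => if x == target then c + 1 else c) 0

def countPairsB (lst : List Int) (target : Int) : Int :=
  (lst.foldl
    (fun (s : PySem.Dict Int Int × Int) x =>
      (s.1.modify x 0 (· + 1), s.2 + s.1.getD (target - x) 0))
    (PySem.Dict.empty, 0)).2

def goB (target : Int) : Nat → List Int → Int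
  | 0, _ => 0
  | 1, lst => if (1 : Int) > lst.length then 0 else countEqB lst target
  | 2, lst => if (2 : Int) > lst.length then 0 else countPairsB lst target
  | (r + 3), lst =>
      if ((r : Int) + 3) > lst.length then 0
      else
        (PySem.List.pyRange 0 ((lst.length : Int) - ((r : Int) + 3) + 1) 1).foldl
          (fun total idx =>
            total + goB (target - PySem.List.pyGetD lst idx 0) (r + 2)
                      (PySem.List.slice lst (some (idx + 1)) none)) 0

def find3_alt (number : List Int) (sumn : Int) (start : Int) (remain : Int) : Int :=
  goB (-sumn) remain.toNat (PySem.List.slice number (some start) none)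

-- ===== PRECONDITION & SPEC =====
-- Pre_ excludes nonpositive remain with a nonempty first range (there A raises
-- IndexError) and negative start with positive remain (there Python negative indexing
-- makes A count the trailing elements twice — an accidental corner no caller would specify).
def Pre_find3 (number : List Int) (sumn : Int) (start : Int) (remain : Int) : Prop :=
  (1 ≤ remain ∧ 0 ≤ start) ∨ (remain ≤ 0 ∧ (number.length : Int) - remain + 1 ≤ start)
instance (number : List Int) (sumn : Int) (start : Int) (remain : Int) :
    Decidable (Pre_find3 number sumn start remain) := by unfold Pre_find3; infer_instance

def pvWitness_find3 : List Int × Int × Int × Int := ([-2, 3, 0, 2, -1], 0, 0, 3)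

def Spec_find3 (number : List Int) (sumn : Int) (start : Int) (remain : Int) (out : Int) : Prop := out = find3_alt number sumn start remain
instance (number : List Int) (sumn : Int) (start : Int) (remain : Int) (out : Int) : Decidable (Spec_find3 number sumn start remain out) := by unfold Spec_find3; infer_instance

-- ===== CLAIM (what is proved, stated in full; the proofs are below) =====
def Claim_equal_find3 : Prop := ∀ (number : List Int) (sumn : Int) (start : Int) (remain : Int), Dom_find3 number sumn start remain → Pre_find3 number sumn start remain → Spec_find3 number sumn start remain (find3 number sumn start remain)

-- ===== LEMMAS AND PROOFS =====
-- spec k t lst = number of k-element (index-increasing) combinations of lst summing to t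
def specC : Nat → Int → List Int → Int
  | 0, t, _ => if t = 0 then 1 else 0
  | _ + 1, _, [] => 0
  | k + 1, t, x :: xs => specC (k + 1) t xs + specC k (t - x) xs

theorem specC_short : ∀ (k : Nat) (t : Int) (lst : List Int), lst.length < k + 1 → specC (k + 1) t lst = 0 := by
  intro k t lst
  induction lst generalizing k t with
  | nil => intro _; rfl
  | cons x xs ih =>
      intro h
      simp only [List.length_cons] at h
      match k with
      | 0 => omega
      | k + 1 =>
          simp only [specC]
          rw [show k + 1 + 1 = (k+1) + 1 from rfl, ih (k+1) t (by omega), ih k _ (by omega)]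
          simp

theorem specC_one_count : ∀ (t : Int) (lst : List Int), specC 1 t lst = (lst.count t : Int) := by
  intro t lst
  induction lst with
  | nil => rfl
  | cons x xs ih =>
      simp only [specC, ih, List.count_cons]
      by_cases hx : x = t
      · have : t - x = 0 := by omega
        simp [specC, hx, this]
      · have : ¬ t - x = 0 := by omega
        simp [specC, this, hx]

-- A's remain = 1 loop / B's count_eq, with a general accumulator
theorem foldl_count_pred (p : Int → Bool) (t : Int) (hp : ∀ x, p x = (x == t)) :
    ∀ (lst : List Int) (c : Int),
      lst.foldl (fun c x => if p x then c + 1 else c) c = c + (lst.count t : Int) := by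
  intro lst
  induction lst with
  | nil => intro c; simp
  | cons x xs ih =>
      intro c
      simp only [List.foldl_cons, List.count_cons, hp x]
      by_cases hx : x = t
      · simp only [hx, beq_self_eq_true, if_true, ih]
        push_cast
        omega
      · have : (x == t) = false := by simp [hx]
        simp only [this, if_false, ih]
        simp

-- the streaming pair count: invariant over the processed prefix p
def pairSpec (t : Int) : List Int → List Int → Int
  | _, [] => 0
  | p, x :: xs => (p.count (t - x) : Int) + pairSpec t (p ++ [x]) xs

theorem pairSpec_congr (t : Int) :
    ∀ (xs p q : List Int), (∀ v, p.count v = q.count v) → pairSpec t p xs = pairSpec t q xs := by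
  intro xs
  induction xs with
  | nil => intro p q _; rfl
  | cons x l ih =>
      intro p q h
      simp only [pairSpec, h (t - x)]
      rw [ih (p ++ [x]) (q ++ [x]) (fun v => by simp [List.count_append, h v])]

theorem pairSpec_append (t x : Int) :
    ∀ (xs p : List Int), pairSpec t (p ++ [x]) xs = pairSpec t p xs + (xs.count (t - x) : Int) := by
  intro xs
  induction xs with
  | nil => intro p; simp [pairSpec]
  | cons y l ih =>
      intro p
      simp only [pairSpec, List.count_append, List.count_cons]
      rw [pairSpec_congr t l ((p ++ [x]) ++ [y]) ((p ++ [y]) ++ [x])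
            (fun v => by simp [List.count_append, List.count_cons]; omega),
          ih (p ++ [y])]
      have hxy : (x == t - y) = (y == t - x) := by
        rw [Bool.eq_iff_iff]
        simp only [beq_iff_eq]
        omega
      rw [hxy]
      simp only [List.count_nil, List.count_cons]
      split_ifs <;> push_cast <;> ring

theorem specC_two_pairSpec (t : Int) :
    ∀ (lst : List Int), specC 2 t lst = pairSpec t [] lst := by
  intro lst
  induction lst with
  | nil => rfl
  | cons x xs ih =>
      show specC 2 t xs + specC 1 (t - x) xs = pairSpec t [] (x :: xs)
      simp only [pairSpec, List.nil_append, specC_one_count]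
      rw [show ([x] : List Int) = [] ++ [x] from rfl, pairSpec_append, ← ih]
      simp

theorem countPairsB_go (t : Int) :
    ∀ (xs p : List Int) (c : Int),
      (xs.foldl
        (fun (s : PySem.Dict Int Int × Int) x =>
          (s.1.modify x 0 (· + 1), s.2 + s.1.getD (t - x) 0))
        (PySem.Dict.counter p, c)).2 = c + pairSpec t p xs := by
  intro xs
  induction xs with
  | nil => intro p c; simp [pairSpec]
  | cons x l ih =>
      intro p c
      simp only [List.foldl_cons, pairSpec]
      rw [show ((PySem.Dict.counter p).modify x 0 (· + 1)) = PySem.Dict.counter (p ++ [x]) from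
            (PySem.Dict.counter_append_singleton p x).symm,
          ih (p ++ [x]), PySem.Dict.getD_counter]
      ring

theorem countPairsB_eq_specC (lst : List Int) (t : Int) : countPairsB lst t = specC 2 t lst := by
  unfold countPairsB
  rw [show (PySem.Dict.empty : PySem.Dict Int Int) = PySem.Dict.counter [] from rfl,
      countPairsB_go t lst [] 0, specC_two_pairSpec]
  ring

-- the common "choose the next element" loop, by induction on the distance to the range end
theorem loop_sum (k : Nat) (lst : List Int) (t : Int) :
    ∀ (start : Int), 0 ≤ start →
      (PySem.List.pyRange start ((lst.length : Int) - ((k : Int) + 2) + 1) 1).foldl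
        (fun c i => c + specC (k + 1) (t - PySem.List.pyGetD lst i 0) (lst.drop (i.toNat + 1))) 0
      = specC (k + 2) t (lst.drop start.toNat) := by
  have main : ∀ (n : Nat) (start : Int), 0 ≤ start →
      (((lst.length : Int) - ((k : Int) + 2) + 1) - start).toNat ≤ n →
      (PySem.List.pyRange start ((lst.length : Int) - ((k : Int) + 2) + 1) 1).foldl
        (fun c i => c + specC (k + 1) (t - PySem.List.pyGetD lst i 0) (lst.drop (i.toNat + 1))) 0
      = specC (k + 2) t (lst.drop start.toNat) := by
    intro n
    induction n with
    | zero =>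
        intro start h0 hn
        have hb : (lst.length : Int) - ((k : Int) + 2) + 1 ≤ start := by omega
        rw [PySem.List.pyRange_one_eq_nil hb]
        have hlen : (lst.drop start.toNat).length < (k + 1) + 1 := by
          simp only [List.length_drop]
          omega
        rw [show k + 2 = (k + 1) + 1 from rfl, specC_short (k + 1) t _ hlen]
        rfl
    | succ n ih =>
        intro start h0 hn
        by_cases hb : (lst.length : Int) - ((k : Int) + 2) + 1 ≤ start
        · rw [PySem.List.pyRange_one_eq_nil hb]
          have hlen : (lst.drop start.toNat).length < (k + 1) + 1 := by
            simp only [List.length_drop]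
            omega
          rw [show k + 2 = (k + 1) + 1 from rfl, specC_short (k + 1) t _ hlen]
          rfl
        · push_neg at hb
          have hlt : start < (lst.length : Int) := by omega
          have hidx : start.toNat < lst.length := by omega
          have hget : PySem.List.pyGetD lst start 0 = lst[start.toNat] := by
            rw [PySem.List.pyGetD_eq_getElem lst 0 h0 hlt]
          have hdrop : lst.drop start.toNat = lst[start.toNat] :: lst.drop (start.toNat + 1) :=
            (List.getElem_cons_drop hidx).symm
          have htn : (start + 1).toNat = start.toNat + 1 := by omega
          have hrec := ih (start + 1) (by omega) (by omega)
          rw [PySem.List.foldl_add, htn] at hrec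
          rw [PySem.List.pyRange_one_cons hb, List.foldl_cons, PySem.List.foldl_add,
              hdrop, show k + 2 = (k + 1) + 1 from rfl]
          simp only [specC]
          rw [hget]
          linarith [hrec]
  exact fun start h0 => main _ start h0 le_rfl

theorem find3Aux_eq_specC :
    ∀ (r : Nat) (number : List Int) (sumn start : Int), 0 ≤ start →
      find3Aux number sumn start (r + 1) = specC (r + 1) (-sumn) (number.drop start.toNat) := by
  intro r
  induction r with
  | zero =>
      intro number sumn start h0
      show (PySem.List.pyRange start ((number.length : Int) - 1 + 1) 1).foldl
          (fun count i => if sumn + PySem.List.pyGetD number i 0 == 0 then count + 1 else count) 0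
        = specC 1 (-sumn) (number.drop start.toNat)
      have hb : (number.length : Int) - 1 + 1 = PySem.List.len number := by
        simp [PySem.List.len]
      rw [hb, PySem.List.foldl_pyRange_pyGetD number 0
            (fun c v => if sumn + v == 0 then c + 1 else c) 0 h0,
          foldl_count_pred (fun v => sumn + v == 0) (-sumn)
            (fun v => by rw [Bool.eq_iff_iff]; simp only [beq_iff_eq]; omega),
          specC_one_count]
      ring
  | succ r ih =>
      intro number sumn start h0
      show (PySem.List.pyRange start ((number.length : Int) - ((r : Int) + 2) + 1) 1).foldl
          (fun count i =>
            count + find3Aux number (sumn + PySem.List.pyGetD number i 0) (i + 1) (r + 1)) 0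
        = specC (r + 2) (-sumn) (number.drop start.toNat)
      rw [PySem.List.foldl_congr_mem _ _
            (fun c i => c + specC (r + 1) (-sumn - PySem.List.pyGetD number i 0)
                          (number.drop (i.toNat + 1))) 0
            (by
              intro acc i hi
              rw [PySem.List.mem_pyRange_one] at hi
              have h1 : 0 ≤ i + 1 := by omega
              rw [ih number (sumn + PySem.List.pyGetD number i 0) (i + 1) h1]
              have h2 : (i + 1).toNat = i.toNat + 1 := by omega
              rw [h2]
              ring_nf),
          loop_sum r number (-sumn) start h0]

theorem goB_eq_specC : ∀ (r : Nat) (lst : List Int) (t : Int), goB t (r + 1) lst = specC (r + 1) t lst := by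
  intro r
  induction r with
  | zero =>
      intro lst t
      show (if (1 : Int) > lst.length then 0 else countEqB lst t) = specC 1 t lst
      by_cases h : (1 : Int) > (lst.length : Int)
      · have : lst = [] := by
          cases lst with
          | nil => rfl
          | cons x xs => simp at h; omega
        simp [h, this, specC]
      · rw [if_neg h]
        unfold countEqB
        rw [foldl_count_pred (fun x => x == t) t (fun _ => rfl), specC_one_count]
        ring
  | succ r ih =>
      intro lst t
      match r with
      | 0 =>
          show (if (2 : Int) > lst.length then 0 else countPairsB lst t) = specC 2 t lst
          by_cases h : (2 : Int) > (lst.length : Int)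
          · rw [if_pos h, show (2 : Nat) = 1 + 1 from rfl,
                specC_short 1 t lst (by simp at h ⊢; omega)]
          · rw [if_neg h, countPairsB_eq_specC]
      | r + 1 =>
          show (if ((r : Int) + 3) > lst.length then 0
            else
              (PySem.List.pyRange 0 ((lst.length : Int) - ((r : Int) + 3) + 1) 1).foldl
                (fun total idx =>
                  total + goB (t - PySem.List.pyGetD lst idx 0) (r + 2)
                            (PySem.List.slice lst (some (idx + 1)) none)) 0)
            = specC (r + 3) t lst
          by_cases h : ((r : Int) + 3) > (lst.length : Int)
          · rw [if_pos h, show r + 3 = (r + 2) + 1 from rfl,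
                specC_short (r + 2) t lst (by omega)]
          · rw [if_neg h]
            rw [PySem.List.foldl_congr_mem _ _
                  (fun c i => c + specC ((r + 1) + 1) (t - PySem.List.pyGetD lst i 0)
                                (lst.drop (i.toNat + 1))) 0
                  (by
                    intro acc i hi
                    rw [PySem.List.mem_pyRange_one] at hi
                    have h1 : (0 : Int) ≤ i + 1 := by omega
                    rw [PySem.List.slice_from lst h1, ih (lst.drop (i + 1).toNat)]
                    have h2 : (i + 1).toNat = i.toNat + 1 := by omega
                    rw [h2])]
            have hb : (lst.length : Int) - ((r : Int) + 3) + 1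
                = (lst.length : Int) - (((r + 1 : Nat) : Int) + 2) + 1 := by push_cast; ring
            rw [hb, loop_sum (r + 1) lst t 0 le_rfl]
            rfl

-- ===== VERDICT (by name: the statement is the Claim_ definition above) =====
theorem find3_spec : Claim_equal_find3 := by
  intro number sumn start remain _ hpre
  unfold Spec_find3 find3 find3_alt
  rcases hpre with ⟨h1, h2⟩ | ⟨h1, h2⟩
  · obtain ⟨r, hr⟩ : ∃ r : Nat, remain.toNat = r + 1 := ⟨remain.toNat - 1, by omega⟩
    rw [hr, PySem.List.slice_from _ h2, find3Aux_eq_specC r number sumn start h2, goB_eq_specC]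
  · -- remain ≤ 0 with an empty first range: A returns 0 without indexing, B's guard returns 0
    have hr : remain.toNat = 0 := by omega
    rw [hr]
    rfl
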